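-- pv_equiv track=rewrite | github.com/SunivAlgo/Algorithm | JiHyeok/프로그래머스 레벨1/모의고사.py | solution
-- ===== SOURCE A (Python) =====
-- def solution(answers):
--     n=[]
--     answer = []
--     s1 = [1,2,3,4,5]
--     s2 = [2,1,2,3,2,4,2,5]
--     s3 = [3,3,1,1,2,2,4,4,5,5]
--
--     s1count = 0
--     s2count = 0
--     s3count = 0
--
--     for i in range(0,len(answers)):
--         if answers[i]==s1[i%5]:
--             s1count+=1
--         if answers[i]==s2[i%8]:
--             s2count+=1
--         if answers[i]==s3[i%10]:
--             s3count+=1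
--
--     n.append(s1count)
--     n.append(s2count)
--     n.append(s3count)
--
--     m = max(n)
--     if n[0]==m:
--         answer.append(1)
--     if n[1]==m:
--         answer.append(2)
--     if n[2]==m:
--         answer.append(3)
--
--     return answer
-- ===== SOURCE B (Python) =====
-- def solution(answers):
--     PAT = [[1, 2, 3, 4, 5], [2, 1, 2, 3, 2, 4, 2, 5], [3, 3, 1, 1, 2, 2, 4, 4, 5, 5]]
--     # All three patterns repeat with period 40 (= lcm(5, 8, 10)), so bucket the
--     # answers by (position mod 40, value) into one hash counter; each taker's
--     # score is then read off with 40 constant-time lookups instead of rescanning.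
--     keys = [(i % 40, a) for i, a in enumerate(answers)]
--     cnt = {}
--     for k in keys:
--         cnt[k] = cnt.get(k, 0) + 1
--     scores = []
--     for p in PAT:
--         s = 0
--         for r in range(40):
--             s += cnt.get((r, p[r % len(p)]), 0)
--         scores.append(s)
--     m = max(scores)
--     return [k + 1 for k in (0, 1, 2) if scores[k] == m]
-- ===== Notes on version B (the rewrite author's own statement) =====
-- stated objective: alternative
-- what changed: B buckets the answers once into a hash counter keyed by (position mod 40, value) -- 40 = lcm of the three pattern periods -- and reads each taker's score off with 40 dictionary lookups, instead of A's single pass comparing every answer against all three cyclic patterns.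
import Mathlib
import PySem

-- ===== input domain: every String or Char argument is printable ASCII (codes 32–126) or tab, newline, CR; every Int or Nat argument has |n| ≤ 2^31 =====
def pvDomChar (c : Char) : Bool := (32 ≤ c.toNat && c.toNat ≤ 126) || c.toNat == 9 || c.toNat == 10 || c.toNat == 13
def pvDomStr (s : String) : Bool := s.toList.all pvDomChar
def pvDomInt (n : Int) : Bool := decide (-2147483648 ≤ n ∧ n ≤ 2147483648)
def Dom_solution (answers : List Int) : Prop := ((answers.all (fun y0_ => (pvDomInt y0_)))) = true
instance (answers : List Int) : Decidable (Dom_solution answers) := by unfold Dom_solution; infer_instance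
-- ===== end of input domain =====

-- B replaces A's triple-comparison pass by one bucket counter keyed by (position mod 40, value)
-- (40 = lcm of the pattern periods) plus 40 lookups per taker (alternative algorithm, same cost).


-- ===== PORT A =====
-- one loop step of A's `for i in range(0, len(answers))` updating (s1count, s2count, s3count)
def pvStepA (answers : List Int) (st : Int × Int × Int) (i : Int) : Int × Int × Int :=
  let a := PySem.List.pyGetD answers i 0      -- answers[i]; exact: i ∈ range(len(answers))
  ((if a = PySem.List.pyGetD [1,2,3,4,5] (PySem.Int.mod i 5) 0 then st.1 + 1 else st.1),
   (if a = PySem.List.pyGetD [2,1,2,3,2,4,2,5] (PySem.Int.mod i 8) 0 then st.2.1 + 1 else st.2.1),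
   (if a = PySem.List.pyGetD [3,3,1,1,2,2,4,4,5,5] (PySem.Int.mod i 10) 0 then st.2.2 + 1 else st.2.2))

def solution (answers : List Int) : List Int :=
  let c := (PySem.List.pyRange 0 (answers.length : Int)).foldl (pvStepA answers) (0, 0, 0)
  let n : List Int := [c.1, c.2.1, c.2.2]
  let m : Int := (PySem.List.max? n (fun x => x)).getD 0   -- max(n); exact: n has 3 elements
  let answer : List Int := []
  let answer := if PySem.List.pyGetD n 0 0 = m then answer ++ [1] else answer
  let answer := if PySem.List.pyGetD n 1 0 = m then answer ++ [2] else answer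
  let answer := if PySem.List.pyGetD n 2 0 = m then answer ++ [3] else answer
  answer

-- ===== PORT B =====
-- keys = [(i % 40, a) for i, a in enumerate(answers)]
def pvKeys (answers : List Int) : List (Int × Int) :=
  (PySem.List.enumerate answers).map (fun ia => (PySem.Int.mod ia.1 40, ia.2))

-- s = 0; for r in range(40): s += cnt.get((r, p[r % len(p)]), 0); index exact: 0 ≤ r % len(p) < len(p)
def pvBScore (cnt : PySem.Dict (Int × Int) Int) (p : List Int) : Int :=
  (PySem.List.pyRange 0 40).foldl
    (fun s r => s + cnt.getD (r, PySem.List.pyGetD p (PySem.Int.mod r (p.length : Int)) 0) 0) 0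

def solution_alt (answers : List Int) : List Int :=
  let patterns : List (List Int) := [[1,2,3,4,5], [2,1,2,3,2,4,2,5], [3,3,1,1,2,2,4,4,5,5]]
  let keys := pvKeys answers
  let cnt := keys.foldl (fun d k => d.insert k (d.getD k 0 + 1)) PySem.Dict.empty
  let scores := patterns.foldl (fun sc p => sc ++ [pvBScore cnt p]) []
  let m : Int := (PySem.List.max? scores (fun x => x)).getD 0   -- max(scores); exact: 3 elements
  (([0,1,2] : List Int).filter (fun k => PySem.List.pyGetD scores k 0 == m)).map (· + 1)

-- ===== PRECONDITION & SPEC =====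
def Spec_solution (answers : List Int) (out : List Int) : Prop := out = solution_alt answers
instance (answers : List Int) (out : List Int) : Decidable (Spec_solution answers out) := by unfold Spec_solution; infer_instance

-- ===== CLAIM (what is proved, stated in full; the proofs are below) =====
def Claim_equal_solution : Prop := ∀ (answers : List Int), Dom_solution answers → Spec_solution answers (solution answers)

-- ===== LEMMAS AND PROOFS =====

-- proof-only characterization: per-pattern match count of the answers
def pvScore (p : List Int) (answers : List Int) : Int :=
  (PySem.List.enumerate answers).foldl
    (fun acc ia =>
      if ia.2 = PySem.List.pyGetD p (PySem.Int.mod ia.1 (p.length : Int)) 0 then acc + 1 else acc) 0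

lemma pv_enumerate_append (xs : List Int) (y : Int) (k : Int) :
    PySem.List.enumerate (xs ++ [y]) k
      = PySem.List.enumerate xs k ++ [(k + xs.length, y)] := by
  induction xs generalizing k with
  | nil => simp [PySem.List.enumerate]
  | cons x xs ih =>
      simp [PySem.List.enumerate, ih (k + 1)]
      ring_nf

lemma pvScore_append (p : List Int) (ys : List Int) (y : Int) :
    pvScore p (ys ++ [y])
      = pvScore p ys
        + (if y = PySem.List.pyGetD p (PySem.Int.mod (ys.length : Int) (p.length : Int)) 0
           then 1 else 0) := by
  unfold pvScore
  rw [pv_enumerate_append, List.foldl_append]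
  simp only [List.foldl_cons, List.foldl_nil, zero_add]
  split_ifs <;> simp

lemma pv_pyGetD_append_lt (ys : List Int) (y : Int) (i : Int) (h0 : 0 ≤ i)
    (h : i < (ys.length : Int)) :
    PySem.List.pyGetD (ys ++ [y]) i 0 = PySem.List.pyGetD ys i 0 := by
  obtain ⟨m, rfl⟩ : ∃ m : Nat, i = (m : Int) := ⟨i.toNat, (Int.toNat_of_nonneg h0).symm⟩
  have hm : m < ys.length := by exact_mod_cast h
  rw [PySem.List.pyGetD_natCast, PySem.List.pyGetD_natCast]
  simp [List.getD, List.getElem?_append_left hm]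

-- A's interleaved loop computes the three per-pattern scores
lemma pv_loopA_eq (ans : List Int) :
    (PySem.List.pyRange 0 (ans.length : Int)).foldl (pvStepA ans) (0, 0, 0)
      = (pvScore [1,2,3,4,5] ans, pvScore [2,1,2,3,2,4,2,5] ans,
         pvScore [3,3,1,1,2,2,4,4,5,5] ans) := by
  induction ans using List.reverseRecOn with
  | nil => decide
  | append_singleton ys y ih =>
      have hlen : ((ys ++ [y]).length : Int) = (ys.length : Int) + 1 := by simp
      rw [hlen, PySem.List.pyRange_one_succ_right (by positivity), List.foldl_append]
      have hcong :
          (PySem.List.pyRange 0 (ys.length : Int)).foldl (pvStepA (ys ++ [y])) (0, 0, 0)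
            = (PySem.List.pyRange 0 (ys.length : Int)).foldl (pvStepA ys) (0, 0, 0) := by
        apply PySem.List.foldl_congr_mem
        intro acc i hi
        have hib := (PySem.List.mem_pyRange_one).1 hi
        unfold pvStepA
        rw [pv_pyGetD_append_lt ys y i hib.1 hib.2]
      rw [hcong, ih]
      simp only [List.foldl_cons, List.foldl_nil]
      have hy : PySem.List.pyGetD (ys ++ [y]) (ys.length : Int) 0 = y := by
        rw [PySem.List.pyGetD_natCast]
        simp [List.getD]
      unfold pvStepA
      rw [hy]
      rw [pvScore_append, pvScore_append, pvScore_append]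
      refine Prod.ext ?_ (Prod.ext ?_ ?_)
      · simp only [List.length_cons, List.length_nil]
        norm_num
        split_ifs <;> ring
      · simp only [List.length_cons, List.length_nil]
        norm_num
        split_ifs <;> ring
      · simp only [List.length_cons, List.length_nil]
        norm_num
        split_ifs <;> ring

-- a 0/1 indicator summed over range(40) picks out the single residue q
lemma pv_sum_single (q y : Int) (f : Int → Int) (h0 : 0 ≤ q) (h1 : q < 40) :
    ((PySem.List.pyRange 0 40).map
        (fun r => ((([((q, y))] : List (Int × Int)).count (r, f r) : Int)))).sum
      = if y = f q then 1 else 0 := by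
  rw [PySem.List.pyRange_one_append 0 q 40 h0 (le_of_lt h1),
      PySem.List.pyRange_one_cons h1]
  rw [List.map_append, List.sum_append, List.map_cons, List.sum_cons]
  have hleft : ((PySem.List.pyRange 0 q).map
      (fun r => ((([((q, y))] : List (Int × Int)).count (r, f r) : Int)))).sum = 0 := by
    apply List.sum_eq_zero
    intro x hx
    obtain ⟨r, hr, rfl⟩ := List.mem_map.1 hx
    have hb := (PySem.List.mem_pyRange_one).1 hr
    simp [List.count_cons]
    intro h
    exfalso
    omega
  have hright : ((PySem.List.pyRange (q+1) 40).map
      (fun r => ((([((q, y))] : List (Int × Int)).count (r, f r) : Int)))).sum = 0 := by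
    apply List.sum_eq_zero
    intro x hx
    obtain ⟨r, hr, rfl⟩ := List.mem_map.1 hx
    have hb := (PySem.List.mem_pyRange_one).1 hr
    simp [List.count_cons]
    intro h
    exfalso
    omega
  rw [hleft, hright]
  by_cases h : y = f q
  · subst h; simp
  · simp [h]

-- counting buckets reproduces the per-pattern score
lemma pv_bucket_score (p : List Int) (hdvd : (p.length : Int) ∣ 40) (hpos : 0 < (p.length : Int))
    (ans : List Int) :
    ((PySem.List.pyRange 0 40).map
        (fun r => (((pvKeys ans).count
            (r, PySem.List.pyGetD p (PySem.Int.mod r (p.length : Int)) 0) : Int)))).sum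
      = pvScore p ans := by
  induction ans using List.reverseRecOn with
  | nil =>
      simp [pvKeys, pvScore, PySem.List.enumerate]
  | append_singleton ys y ih =>
      have hkeys : pvKeys (ys ++ [y])
          = pvKeys ys ++ [(PySem.Int.mod (ys.length : Int) 40, y)] := by
        unfold pvKeys
        rw [pv_enumerate_append]
        simp
      rw [hkeys]
      simp only [List.count_append, Nat.cast_add]
      rw [PySem.List.sum_map_add_int, ih]
      have hq0 : 0 ≤ PySem.Int.mod (ys.length : Int) 40 := by
        rw [PySem.Int.mod_eq_emod_of_pos (by norm_num)]
        exact Int.emod_nonneg _ (by norm_num)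
      have hq1 : PySem.Int.mod (ys.length : Int) 40 < 40 := by
        rw [PySem.Int.mod_eq_emod_of_pos (by norm_num)]
        exact Int.emod_lt_of_pos _ (by norm_num)
      rw [pv_sum_single _ y _ hq0 hq1]
      have hm : PySem.Int.mod (PySem.Int.mod (ys.length : Int) 40) (p.length : Int)
          = PySem.Int.mod (ys.length : Int) (p.length : Int) := by
        rw [PySem.Int.mod_eq_emod_of_pos (b := 40) (by norm_num),
            PySem.Int.mod_eq_emod_of_pos hpos, PySem.Int.mod_eq_emod_of_pos hpos]
        exact Int.emod_emod_of_dvd _ hdvd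
      rw [hm, pvScore_append]

-- ===== VERDICT (by name: the statement is the Claim_ definition above) =====
theorem solution_spec : Claim_equal_solution := by
  intro answers _
  unfold Spec_solution solution solution_alt
  rw [pv_loopA_eq]
  have hsc : ∀ p : List Int, (p.length : Int) ∣ 40 → 0 < (p.length : Int) →
      pvBScore ((pvKeys answers).foldl
        (fun d k => d.insert k (d.getD k 0 + 1)) PySem.Dict.empty) p = pvScore p answers := by
    intro p hdvd hpos
    unfold pvBScore
    rw [PySem.List.foldl_add]
    simp only [PySem.Dict.getD_foldl_insert_add_one, PySem.Dict.getD_empty, zero_add]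
    exact pv_bucket_score p hdvd hpos answers
  simp only [List.foldl_cons, List.foldl_nil, List.nil_append]
  rw [hsc [1,2,3,4,5] (by norm_num) (by norm_num),
      hsc [2,1,2,3,2,4,2,5] (by norm_num) (by norm_num),
      hsc [3,3,1,1,2,2,4,4,5,5] (by norm_num) (by norm_num)]
  generalize pvScore [1,2,3,4,5] answers = a
  generalize pvScore [2,1,2,3,2,4,2,5] answers = b
  generalize pvScore [3,3,1,1,2,2,4,4,5,5] answers = c
  have hm : ∃ m, (PySem.List.max? [a, b, c] (fun x => x)) = some m ∧ m ∈ [a,b,c] := by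
    simp [PySem.List.max?]
    split_ifs <;> simp <;> split_ifs <;> simp
  obtain ⟨m, hm1, hm2⟩ := hm
  rw [hm1]
  simp only [Option.getD_some]
  by_cases h1 : a = m <;> by_cases h2 : b = m <;> by_cases h3 : c = m <;>
    simp_all [PySem.List.pyGetD]
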